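-- pv_equiv track=rewrite | github.com/legentilcedric/leezair | pangram.py | pangram_detector
-- ===== SOURCE A (Python) =====
-- import string
--
-- def pangram_detector(s):
--
--     # Split the text into lines
--     list_of_lines = s.split('\n')
--
--     # Get the number of sentences
--     N = int(list_of_lines[0])
--
--     # Creation of the list returned by this function
--     output = []
--
--
--     # For each sentence
--     for line in list_of_lines[1:(N+1)]:
--
--         # Remove the spaces
--         t_line = line.replace(" ","")
--
--         # Create a dictionary of each lowercase characters
--         presence = dict.fromkeys(string.ascii_lowercase,0)
--
--         # Actualize the precence dictionary for each character of the sentence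
--         for char in list(t_line):
--             presence[char] = 1;
--
--         # If all the characters are in the sentence, append '1' to the output
--         if(sum(presence.values()) == 26):
--             output.append('1')
--
--         # Else, get all the missing characters and append them as a string to the output
--         else:
--             missing_char = ""
--             for key, value in presence.items():
--                 if value != 1:
--                     missing_char += key
--             output.append(missing_char)
--
--     return output
-- ===== SOURCE B (Python) =====
-- import string
--
-- def _emit(cur):
--     # result for one finished sentence: its set of non-space characters
--     if len(cur) == 26:
--         return '1'
--     return ''.join(c for c in string.ascii_lowercase if c not in cur)
--
-- def pangram_detector(s):
--     # single pass: parse the leading count, then stream the remaining characters,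
--     # cutting at newlines, keeping a set of the current sentence's non-space chars
--     head, sep, rest = s.partition('\n')
--     n = int(head)
--     output = []
--     if not sep or n <= 0:
--         return output
--     cur = set()
--     for c in rest:
--         if c == '\n':
--             output.append(_emit(cur))
--             if len(output) == n:
--                 return output
--             cur = set()
--         elif c != ' ':
--             cur.add(c)
--     output.append(_emit(cur))
--     return output
-- ===== Notes on version B (the rewrite author's own statement) =====
-- stated objective: alternative
-- what changed: B never materializes the list of lines: it partitions off the count header once and then streams the remaining characters in a single pass, cutting at newlines and keeping one set of the current sentence's non-space characters, instead of A's split-into-lines, slice lines[1:N+1], and per-line 26-key flag dictionary with a value sum and an items scan.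
import Mathlib
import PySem

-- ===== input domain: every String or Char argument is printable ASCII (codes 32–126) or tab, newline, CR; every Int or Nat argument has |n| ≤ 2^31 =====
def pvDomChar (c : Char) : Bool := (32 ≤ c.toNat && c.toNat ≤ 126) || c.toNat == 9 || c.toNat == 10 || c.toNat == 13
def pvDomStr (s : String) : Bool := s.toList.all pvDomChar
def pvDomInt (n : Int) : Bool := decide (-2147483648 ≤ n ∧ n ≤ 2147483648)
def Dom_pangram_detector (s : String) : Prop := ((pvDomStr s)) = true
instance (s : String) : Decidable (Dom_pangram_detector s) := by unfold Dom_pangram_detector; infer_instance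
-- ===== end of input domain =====

-- B replaces A's split-into-lines / slice / per-line 26-key flag dictionary by a single
-- streaming pass over the characters after the header, cutting at newlines and keeping a
-- set of the current sentence's non-space characters; alternative decomposition, same cost.

-- string.ascii_lowercase
def pvAz : List Char :=
  ['a','b','c','d','e','f','g','h','i','j','k','l','m','n','o','p','q','r','s','t','u','v','w','x','y','z']

-- ===== PORT A =====
-- the body of A's 'for line in …' loop
def pvProcessA (line : String) : String :=
  let t_line := PySem.Str.replace line " " ""
  -- presence = dict.fromkeys(string.ascii_lowercase, 0)
  let presence : PySem.Dict Char Int := pvAz.foldl (fun d k => d.insert k 0) PySem.Dict.empty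
  -- for char in list(t_line): presence[char] = 1
  let presence := t_line.toList.foldl (fun d c => d.insert c 1) presence
  if presence.values.sum == 26 then "1"
  else
    -- missing_char += key, built over List Char
    String.ofList (presence.items.foldl (fun acc kv => if kv.2 != 1 then acc ++ [kv.1] else acc) [])

def pangram_detector (s : String) : List String :=
  let list_of_lines := (PySem.Str.split? s "\n").getD []
  -- N = int(list_of_lines[0]); split always yields ≥ 1 piece, so the [0] cannot raise
  match PySem.Int.ofStr? ((PySem.List.pyGet? list_of_lines 0).getD "") with
  | none => []    -- int() raises ValueError here; excluded by Pre_
  | some n =>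
    (PySem.List.slice list_of_lines (some 1) (some (n + 1))).foldl
      (fun output line => output ++ [pvProcessA line]) []

-- ===== PORT B =====
-- _emit(cur)
def pvEmit (cur : PySem.Set Char) : String :=
  if PySem.Set.len cur == 26 then "1"
  else String.ofList (pvAz.filter (fun c => !(PySem.Set.contains cur c)))

-- s.partition('\n') over the character list: (head, separator found?, rest); exact by structural scan
def pvPartitionNl : List Char → List Char × Bool × List Char
  | [] => ([], false, [])
  | c :: rest =>
    if c = '\n' then ([], true, rest)
    else
      let (h, f, r) := pvPartitionNl rest
      (c :: h, f, r)

-- the 'for c in rest' streaming loop of B, with its early return when len(output) == n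
def pvStream (cs : List Char) (n : Int) (output : List String) (cur : PySem.Set Char) : List String :=
  match cs with
  | [] => output ++ [pvEmit cur]
  | c :: rest =>
    if c = '\n' then
      let output' := output ++ [pvEmit cur]
      if (output'.length : Int) = n then output'
      else pvStream rest n output' PySem.Set.empty
    else if c = ' ' then pvStream rest n output cur
    else pvStream rest n output (PySem.Set.add cur c)

def pangram_detector_alt (s : String) : List String :=
  match pvPartitionNl s.toList with
  | (head, sep, rest) =>
    match PySem.Int.ofStr? (String.ofList head) with
    | none => []    -- int() raises ValueError here; excluded by Pre_
    | some n =>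
      if sep = false ∨ n ≤ 0 then []
      else pvStream rest n [] PySem.Set.empty

-- ===== PRECONDITION & SPEC =====
-- Pre_ excludes the inputs where int(first line) raises ValueError, and negative sentence
-- counts (outside the task's natural domain; there A's slice lines[1:N+1] counts lines from
-- the end of the input — an accident of Python slicing that a streaming reading has no use for).
def Pre_pangram_detector (s : String) : Prop :=
  0 ≤ (PySem.Int.ofStr? ((PySem.List.pyGet? ((PySem.Str.split? s "\n").getD []) 0).getD "")).getD (-1)
instance (s : String) : Decidable (Pre_pangram_detector s) := by unfold Pre_pangram_detector; infer_instance

def pvWitness_pangram_detector : String := "2\nthe quick brown fox jumps over the lazy dog\nabc def"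

def Spec_pangram_detector (s : String) (out : List String) : Prop := out = pangram_detector_alt s
instance (s : String) (out : List String) : Decidable (Spec_pangram_detector s out) := by unfold Spec_pangram_detector; infer_instance

-- ===== CLAIM (what is proved, stated in full; the proofs are below) =====
def Claim_equal_pangram_detector : Prop := ∀ (s : String), Dom_pangram_detector s → Pre_pangram_detector s → Spec_pangram_detector s (pangram_detector s)

-- ===== LEMMAS AND PROOFS =====

-- ---- A side: the items list of A's presence dict after the marking loop over cs ----
def pvShape (cs : List Char) : List (Char × Int) :=
  pvAz.map (fun k => (k, if cs.contains k then (1:Int) else 0))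
  ++ (PySem.Set.ofList (cs.filter (fun c => !pvAz.contains c))).map (fun c => (c, (1:Int)))

theorem pvAdd_mem (E : PySem.Set Char) (c : Char) (h : c ∈ E) : PySem.Set.add E c = E := by
  simp [PySem.Set.add, h]

theorem pvAdd_not_mem (E : PySem.Set Char) (c : Char) (h : c ∉ E) :
    PySem.Set.add E c = E ++ [c] := by
  simp [PySem.Set.add, h]

theorem pvSetSnoc (l : List Char) (c : Char) :
    PySem.Set.ofList (l ++ [c]) = PySem.Set.add (PySem.Set.ofList l) c := by
  rw [PySem.Set.ofList_eq_foldl, PySem.Set.ofList_eq_foldl, List.foldl_append]; rfl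

theorem pvShape_step (d : PySem.Dict Char Int) (seen : List Char) (c : Char)
    (h : d.items = pvShape seen) : (d.insert c 1).items = pvShape (seen ++ [c]) := by
  have hkeys : d.keys = pvAz ++ PySem.Set.ofList (seen.filter (fun x => !pvAz.contains x)) := by
    simp only [PySem.Dict.keys, h]
    unfold pvShape
    rw [List.map_append, List.map_map, List.map_map,
      show ((fun x : Char × Int => x.1) ∘ fun k => (k, if seen.contains k then (1:Int) else 0))
        = fun k => k from rfl,
      show ((fun x : Char × Int => x.1) ∘ fun c => (c, (1:Int))) = fun c => c from rfl]
    simp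
  have hcont : d.contains c
      = decide (c ∈ pvAz ∨ c ∈ PySem.Set.ofList (seen.filter (fun x => !pvAz.contains x))) := by
    rw [PySem.Dict.contains_eq_decide_mem_keys, hkeys]; simp
  by_cases haz : c ∈ pvAz
  · have hct : d.contains c = true := by rw [hcont]; exact decide_eq_true (Or.inl haz)
    rw [PySem.Dict.items_insert_of_contains _ _ hct, h]
    unfold pvShape
    have hfilt : (seen ++ [c]).filter (fun x => !pvAz.contains x)
        = seen.filter (fun x => !pvAz.contains x) := by
      simp [List.filter_append, haz]
    rw [hfilt, List.map_append, List.map_map, List.map_map]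
    congr 1
    · refine List.map_congr_left ?_
      intro k hk
      by_cases hkc : k = c
      · subst hkc; simp
      · simp [hkc]
    · refine List.map_congr_left ?_
      intro e he
      have hene : e ≠ c := by
        rcases List.mem_filter.mp ((PySem.Set.mem_ofList _ _).mp he) with ⟨-, hpe⟩
        intro hec; subst hec
        simp [haz] at hpe
      simp [hene]
  · have hfilt : (seen ++ [c]).filter (fun x => !pvAz.contains x)
        = seen.filter (fun x => !pvAz.contains x) ++ [c] := by
      simp [List.filter_append, haz]
    have hA : pvAz.map (fun k => (k, if (seen ++ [c]).contains k then (1:Int) else 0))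
        = pvAz.map (fun k => (k, if seen.contains k then (1:Int) else 0)) := by
      refine List.map_congr_left ?_
      intro k hk
      have hkc : k ≠ c := fun hx => haz (hx ▸ hk)
      simp [hkc]
    by_cases hE : c ∈ PySem.Set.ofList (seen.filter (fun x => !pvAz.contains x))
    · have hct : d.contains c = true := by rw [hcont]; exact decide_eq_true (Or.inr hE)
      have hadd : PySem.Set.add (PySem.Set.ofList (seen.filter (fun x => !pvAz.contains x))) c
          = PySem.Set.ofList (seen.filter (fun x => !pvAz.contains x)) := pvAdd_mem _ _ hE
      rw [PySem.Dict.items_insert_of_contains _ _ hct, h]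
      unfold pvShape
      rw [hfilt, pvSetSnoc, hadd, hA, List.map_append, List.map_map, List.map_map]
      congr 1
      · refine List.map_congr_left ?_
        intro k hk
        have hkc : k ≠ c := fun hx => haz (hx ▸ hk)
        simp [hkc]
      · refine List.map_congr_left ?_
        intro e he
        by_cases hec : e = c
        · subst hec; simp
        · simp [hec]
    · have hct : d.contains c = false := by
        rw [hcont]
        exact decide_eq_false (fun hor => hor.elim haz hE)
      have hadd : PySem.Set.add (PySem.Set.ofList (seen.filter (fun x => !pvAz.contains x))) c
          = PySem.Set.ofList (seen.filter (fun x => !pvAz.contains x)) ++ [c] := pvAdd_not_mem _ _ hE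
      rw [PySem.Dict.items_insert_of_not_contains _ _ hct, h]
      unfold pvShape
      rw [hfilt, pvSetSnoc, hadd, hA, List.map_append]
      simp

theorem pvShape_fold (cs : List Char) : ∀ (seen : List Char) (d : PySem.Dict Char Int),
    d.items = pvShape seen →
    (cs.foldl (fun d c => d.insert c 1) d).items = pvShape (seen ++ cs) := by
  induction cs with
  | nil => intro seen d h; simpa using h
  | cons c cs ih =>
    intro seen d h
    simpa [List.append_assoc] using ih (seen ++ [c]) _ (pvShape_step d seen c h)

theorem pvShape_init :
    (pvAz.foldl (fun d k => d.insert k (0:Int)) PySem.Dict.empty).items = pvShape [] := by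
  decide

theorem pvAzNodup : pvAz.Nodup := by decide

-- the distinct-count identity behind 'sum(presence.values()) == 26' ↔ 'len(cur) == 26'
theorem pvCount (cs : List Char) :
    pvAz.countP (fun k => cs.contains k)
      + (PySem.Set.ofList (cs.filter (fun c => !pvAz.contains c))).length
    = (PySem.Set.ofList cs).length := by
  have hSn : (PySem.Set.ofList cs).Nodup := PySem.Set.nodup_ofList cs
  have hsplit := List.length_eq_length_filter_add (l := PySem.Set.ofList cs) (fun k => pvAz.contains k)
  have h1 : ((PySem.Set.ofList cs).filter (fun k => pvAz.contains k)).length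
      = pvAz.countP (fun k => cs.contains k) := by
    have hperm : ((PySem.Set.ofList cs).filter (fun k => pvAz.contains k)).Perm
        (pvAz.filter (fun k => cs.contains k)) := by
      refine (List.perm_ext_iff_of_nodup (hSn.filter _) (pvAzNodup.filter _)).mpr ?_
      intro x
      simp [List.mem_filter, PySem.Set.mem_ofList, and_comm]
    rw [hperm.length_eq, List.countP_eq_length_filter]
  have h2 : (PySem.Set.ofList (cs.filter (fun c => !pvAz.contains c))).length
      = ((PySem.Set.ofList cs).filter (fun k => !pvAz.contains k)).length := by
    have hperm : (PySem.Set.ofList (cs.filter (fun c => !pvAz.contains c))).Perm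
        ((PySem.Set.ofList cs).filter (fun k => !pvAz.contains k)) := by
      refine (List.perm_ext_iff_of_nodup (PySem.Set.nodup_ofList _) (hSn.filter _)).mpr ?_
      intro x
      simp [List.mem_filter, PySem.Set.mem_ofList]
    exact hperm.length_eq
  omega

-- A's per-line body, expressed on the distinct characters, IS B's _emit
theorem pvCore (cs : List Char) :
    (if ((cs.foldl (fun d c => d.insert c 1)
          (pvAz.foldl (fun d k => d.insert k (0:Int)) PySem.Dict.empty)).values.sum == 26) then "1"
     else String.ofList ((cs.foldl (fun d c => d.insert c 1)
          (pvAz.foldl (fun d k => d.insert k (0:Int)) PySem.Dict.empty)).items.foldl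
            (fun acc kv => if kv.2 != 1 then acc ++ [kv.1] else acc) []))
    = pvEmit (PySem.Set.ofList cs) := by
  have hitems : ((cs.foldl (fun d c => d.insert c 1)
      (pvAz.foldl (fun d k => d.insert k (0:Int)) PySem.Dict.empty)).items) = pvShape cs := by
    simpa using pvShape_fold cs [] _ pvShape_init
  have hsum : ((pvShape cs).map (·.2)).sum = ((PySem.Set.ofList cs).length : Int) := by
    rw [pvShape, List.map_append, List.sum_append, List.map_map, List.map_map]
    have e1 : ((fun p : Char × Int => p.2) ∘ fun k => (k, if cs.contains k then (1:Int) else 0))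
        = fun k => if cs.contains k then (1:Int) else 0 := rfl
    have e2 : ((fun p : Char × Int => p.2) ∘ fun c => (c, (1:Int))) = fun _ => (1:Int) := rfl
    rw [e1, e2, PySem.List.sum_map_ite_one_zero]
    have h1 : ((PySem.Set.ofList (cs.filter (fun c => !pvAz.contains c))).map (fun _ => (1:Int))).sum
        = ((PySem.Set.ofList (cs.filter (fun c => !pvAz.contains c))).length : Int) := by
      simp
    rw [h1, ← pvCount cs]
    push_cast
    ring
  have hmiss : (pvShape cs).foldl (fun acc kv => if kv.2 != 1 then acc ++ [kv.1] else acc) []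
      = pvAz.filter (fun k => !cs.contains k) := by
    rw [PySem.List.foldl_append_if (fun kv : Char × Int => kv.2 != 1) (fun kv => kv.1)]
    rw [pvShape, List.filter_append, List.map_append]
    have e1 : (pvAz.map (fun k => (k, if cs.contains k then (1:Int) else 0))).filter
        (fun kv => kv.2 != 1)
        = (pvAz.filter (fun k => !cs.contains k)).map (fun k => (k, (0:Int))) := by
      rw [List.filter_map]
      have h2 : (fun kv : Char × Int => kv.2 != 1) ∘ (fun k => (k, if cs.contains k then (1:Int) else 0))
          = fun k => !cs.contains k := by
        funext k; by_cases h : k ∈ cs <;> simp [h]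
      rw [h2]
      refine List.map_congr_left ?_
      intro k hk
      simp [List.mem_filter] at hk
      simp [hk.2]
    have e2 : ((PySem.Set.ofList (cs.filter (fun c => !pvAz.contains c))).map
        (fun c => (c, (1:Int)))).filter (fun kv => kv.2 != 1) = [] := by
      rw [List.filter_map]
      have h3 : (fun kv : Char × Int => kv.2 != 1) ∘ (fun c => (c, (1:Int))) = fun _ => false := rfl
      rw [h3]
      simp
    rw [e1, e2, List.map_map,
      show ((fun kv : Char × Int => kv.1) ∘ fun k => (k, (0:Int))) = fun k => k from rfl]
    simp
  have hv : (cs.foldl (fun d c => d.insert c 1)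
      (pvAz.foldl (fun d k => d.insert k (0:Int)) PySem.Dict.empty)).values
      = (pvShape cs).map (·.2) := by
    simp [PySem.Dict.values, hitems]
  have hfc : pvAz.filter (fun k => !cs.contains k)
      = pvAz.filter (fun c => !(PySem.Set.contains (PySem.Set.ofList cs) c)) := by
    refine (List.filter_congr ?_).symm
    intro k _
    simp [PySem.Set.contains, PySem.Set.mem_ofList]
  rw [hv, hsum, hitems, hmiss, hfc, pvEmit, PySem.Set.len]

-- ---- replace(line, " ", "") is a filter ----
theorem pvReplaceGo (l : List Char) : ∀ (fuel : Nat) (acc : List Char), l.length ≤ fuel →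
    PySem.Chars.replace.go [' '] [] fuel l acc
      = acc.reverse ++ l.filter (fun c => !(c == ' ')) := by
  induction l with
  | nil =>
    intro fuel acc _
    cases fuel <;> simp [PySem.Chars.replace.go]
  | cons c rest ih =>
    intro fuel acc hle
    cases fuel with
    | zero => simp at hle
    | succ f =>
      have hrest : rest.length ≤ f := by simpa using hle
      by_cases hc : c = ' '
      · subst hc
        have hpre : List.isPrefixOf [' '] (' ' :: rest) = true := by
          simp [List.isPrefixOf]
        simp only [PySem.Chars.replace.go, hpre, eq_self_iff_true, if_true,
          List.length_cons, List.length_nil, List.drop_succ_cons, List.drop_zero,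
          List.reverse_nil, List.nil_append]
        rw [ih f acc hrest]
        simp
      · have hpre : List.isPrefixOf [' '] (c :: rest) = false := by
          simp only [List.isPrefixOf, List.isPrefixOf_nil_left, Bool.and_true, beq_iff_eq]
          exact decide_eq_false (fun h => hc h.symm)
        simp only [PySem.Chars.replace.go, hpre]
        rw [if_neg (by simp), ih f (c :: acc) hrest]
        simp [hc]

theorem pvReplaceSpace (l : List Char) :
    PySem.Chars.replace l [' '] [] = l.filter (fun c => !(c == ' ')) := by
  rw [PySem.Chars.replace, if_neg (by decide : ¬([' '] : List Char).isEmpty = true)]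
  simpa using pvReplaceGo l l.length [] le_rfl

-- ---- splitOn '\n' as a simple structural recursion ----
def pvPieces : List Char → List (List Char)
  | [] => [[]]
  | c :: rest =>
    if c = '\n' then [] :: pvPieces rest
    else (c :: (pvPieces rest).headI) :: (pvPieces rest).tail

theorem pvPieces_ne_nil (l : List Char) : pvPieces l ≠ [] := by
  cases l with
  | nil => simp [pvPieces]
  | cons c rest => by_cases h : c = '\n' <;> simp [pvPieces, h]

theorem pvGoEq (l : List Char) : ∀ (fuel : Nat) (cur : List Char) (acc : List (List Char)),
    l.length ≤ fuel →
    PySem.Chars.splitOn.go ['\n'] fuel l cur acc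
      = acc.reverse ++ (cur.reverse ++ (pvPieces l).headI) :: (pvPieces l).tail := by
  induction l with
  | nil =>
    intro fuel cur acc _
    cases fuel <;> simp [PySem.Chars.splitOn.go, pvPieces]
  | cons c rest ih =>
    intro fuel cur acc hle
    cases fuel with
    | zero => simp at hle
    | succ f =>
      have hrest : rest.length ≤ f := by simpa using hle
      obtain ⟨p, ps, hps⟩ : ∃ p ps, pvPieces rest = p :: ps := by
        cases hx : pvPieces rest with
        | nil => exact absurd hx (pvPieces_ne_nil rest)
        | cons p ps => exact ⟨p, ps, rfl⟩
      by_cases hc : c = '\n'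
      · subst hc
        have hpre : List.isPrefixOf ['\n'] ('\n' :: rest) = true := by
          simp [List.isPrefixOf]
        simp only [PySem.Chars.splitOn.go, hpre, if_pos rfl]
        rw [show List.drop (List.length ['\n']) ('\n' :: rest) = rest by simp]
        rw [ih f [] (cur.reverse :: acc) hrest]
        simp [pvPieces, hps]
      · have hpre : List.isPrefixOf ['\n'] (c :: rest) = false := by
          simp [List.isPrefixOf]
          exact fun h => hc h.symm
        simp only [PySem.Chars.splitOn.go, hpre]
        rw [if_neg (by simp), ih f (c :: cur) acc hrest]
        simp [pvPieces, hc, hps]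

theorem pvSplitOn (l : List Char) : PySem.Chars.splitOn l ['\n'] = pvPieces l := by
  rw [PySem.Chars.splitOn, pvGoEq l (l.length + 1) [] [] (by omega)]
  obtain ⟨p, ps, hps⟩ : ∃ p ps, pvPieces l = p :: ps := by
    cases hx : pvPieces l with
    | nil => exact absurd hx (pvPieces_ne_nil l)
    | cons p ps => exact ⟨p, ps, rfl⟩
  simp [hps]

-- partition('\n') against the piece list
theorem pvPartition_pieces (cs : List Char) :
    pvPieces cs
      = (pvPartitionNl cs).1
        :: (if (pvPartitionNl cs).2.1 = true then pvPieces (pvPartitionNl cs).2.2 else []) := by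
  induction cs with
  | nil => simp [pvPieces, pvPartitionNl]
  | cons c rest ih =>
    by_cases hc : c = '\n'
    · subst hc; simp [pvPieces, pvPartitionNl]
    · simp only [pvPieces, pvPartitionNl, if_neg hc]
      rw [ih]
      cases hf : (pvPartitionNl rest).2.1 <;> simp [hf] at ih ⊢ <;> simp [ih]

-- ---- the streaming loop against the piece list ----
def pvAddAll (cur : PySem.Set Char) (p : List Char) : PySem.Set Char :=
  p.foldl (fun s c => if c = ' ' then s else PySem.Set.add s c) cur

theorem pvAddAll_filter (p : List Char) : ∀ (cur : PySem.Set Char),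
    pvAddAll cur p = (p.filter (fun c => !(c == ' '))).foldl PySem.Set.add cur := by
  induction p with
  | nil => intro cur; simp [pvAddAll]
  | cons c rest ih =>
    intro cur
    by_cases hc : c = ' '
    · subst hc
      simpa [pvAddAll, List.filter_cons] using ih cur
    · simp only [pvAddAll, List.foldl_cons, if_neg hc] at ih ⊢
      rw [List.filter_cons, if_pos (by simp [hc])]
      simpa [pvAddAll] using ih (PySem.Set.add cur c)

theorem pvStreamEq (r : List Char) : ∀ (m : Nat) (out : List String) (cur : PySem.Set Char),
    1 ≤ m →
    pvStream r ((out.length : Int) + m) out cur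
      = out ++ pvEmit (pvAddAll cur (pvPieces r).headI)
          :: ((pvPieces r).tail.take (m - 1)).map (fun p => pvEmit (pvAddAll PySem.Set.empty p)) := by
  induction r with
  | nil =>
    intro m out cur _
    simp [pvStream, pvPieces, pvAddAll]
  | cons c rest ih =>
    intro m out cur hm
    obtain ⟨p, ps, hps⟩ : ∃ p ps, pvPieces rest = p :: ps := by
      cases hx : pvPieces rest with
      | nil => exact absurd hx (pvPieces_ne_nil rest)
      | cons p ps => exact ⟨p, ps, rfl⟩
    by_cases hc : c = '\n'
    · subst hc
      have hgo : pvStream ('\n' :: rest) ((out.length : Int) + m) out cur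
          = (if (((out ++ [pvEmit cur]).length : Int) = (out.length : Int) + m)
             then out ++ [pvEmit cur]
             else pvStream rest ((out.length : Int) + m) (out ++ [pvEmit cur]) PySem.Set.empty) := by
        simp only [pvStream, reduceIte]
      rw [hgo]
      by_cases hm1 : m = 1
      · subst hm1
        rw [if_pos (by simp)]
        simp [pvPieces, pvAddAll]
      · have hm2 : 2 ≤ m := by omega
        rw [if_neg (by
          simp only [List.length_append, List.length_cons, List.length_nil]
          push_cast
          omega)]
        have hstep : pvStream rest ((out.length : Int) + m) (out ++ [pvEmit cur]) PySem.Set.empty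
            = (out ++ [pvEmit cur])
              ++ pvEmit (pvAddAll PySem.Set.empty (pvPieces rest).headI)
                :: ((pvPieces rest).tail.take (m - 1 - 1)).map
                    (fun p => pvEmit (pvAddAll PySem.Set.empty p)) := by
          have hlen : (((out ++ [pvEmit cur]).length : Int)) + ((m - 1 : Nat) : Int)
              = (out.length : Int) + m := by
            simp only [List.length_append, List.length_cons, List.length_nil]
            push_cast
            omega
          have := ih (m - 1) (out ++ [pvEmit cur]) PySem.Set.empty (by omega)
          rw [hlen] at this
          exact this
        rw [hstep]
        simp only [pvPieces, reduceIte, List.headI_cons, List.tail_cons, hps]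
        rw [show m - 1 = (m - 2) + 1 from by omega]
        simp [pvAddAll]
    · have hgo : pvStream (c :: rest) ((out.length : Int) + m) out cur
          = pvStream rest ((out.length : Int) + m) out
              (if c = ' ' then cur else PySem.Set.add cur c) := by
        by_cases hsp : c = ' '
        · subst hsp
          simp only [pvStream, reduceIte]
          rw [if_neg hc]
        · simp only [pvStream]
          rw [if_neg hc, if_neg hsp, if_neg hsp]
      rw [hgo, ih m out _ hm]
      have hpc : pvPieces (c :: rest) = (c :: (pvPieces rest).headI) :: (pvPieces rest).tail := by
        simp only [pvPieces]
        rw [if_neg hc]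
      rw [hpc]
      simp only [List.headI_cons, List.tail_cons]
      have haa : pvAddAll cur (c :: (pvPieces rest).headI)
          = pvAddAll (if c = ' ' then cur else PySem.Set.add cur c) (pvPieces rest).headI := by
        by_cases hsp : c = ' ' <;> simp [pvAddAll, hsp]
      rw [haa]

-- per piece: A's loop body on the piece IS B's emitted value
theorem pvPiece (p : List Char) :
    pvProcessA (String.ofList p) = pvEmit (pvAddAll PySem.Set.empty p) := by
  have ht : (PySem.Str.replace (String.ofList p) " " "").toList
      = p.filter (fun c => !(c == ' ')) := by
    rw [PySem.Str.toList_replace, String.toList_ofList]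
    have h1 : (" " : String).toList = [' '] := by decide
    have h2 : ("" : String).toList = [] := by decide
    rw [h1, h2, pvReplaceSpace]
  have hset : PySem.Set.ofList (p.filter (fun c => !(c == ' '))) = pvAddAll PySem.Set.empty p := by
    rw [pvAddAll_filter, PySem.Set.ofList_eq_foldl]
    rfl
  show (if _ then "1" else _) = _
  rw [ht]
  calc _ = pvEmit (PySem.Set.ofList (p.filter (fun c => !(c == ' ')))) := pvCore _
    _ = _ := by rw [hset]

set_option maxHeartbeats 1000000 in
theorem pangram_detector_spec : Claim_equal_pangram_detector := by
  intro s _ hpre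
  unfold Spec_pangram_detector
  have hnl : ("\n" : String).toList = ['\n'] := by decide
  have hlines : (PySem.Str.split? s "\n").getD [] = (pvPieces s.toList).map String.ofList := by
    rw [PySem.Str.split?, PySem.Chars.split?, hnl]
    rw [if_neg (by simp)]
    simp [pvSplitOn]
  obtain ⟨p, ps, hps⟩ : ∃ p ps, pvPieces s.toList = p :: ps := by
    cases hx : pvPieces s.toList with
    | nil => exact absurd hx (pvPieces_ne_nil s.toList)
    | cons p ps => exact ⟨p, ps, rfl⟩
  have hget : (PySem.List.pyGet? ((pvPieces s.toList).map String.ofList) 0).getD ""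
      = String.ofList p := by
    rw [hps]
    simp [PySem.List.pyGet?, PySem.List.pyIdx?]
  unfold Pre_pangram_detector at hpre
  rw [hlines, hget] at hpre
  cases hof : PySem.Int.ofStr? (String.ofList p) with
  | none => rw [hof] at hpre; simp at hpre
  | some n =>
    have hnn : 0 ≤ n := by rw [hof] at hpre; simpa using hpre
    have hpieces := pvPartition_pieces s.toList
    obtain ⟨head, sep, rest, hcs⟩ : ∃ h f r, pvPartitionNl s.toList = (h, f, r) :=
      ⟨_, _, _, rfl⟩
    rw [hcs, hps] at hpieces
    simp only at hpieces
    have hheadp : head = p := (List.cons.injEq .. ▸ hpieces).1.symm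
    have htail : ps = (if sep = true then pvPieces rest else []) :=
      (List.cons.injEq .. ▸ hpieces).2
    -- A's side: the slice is take n.toNat of the pieces after the first
    have hA : pangram_detector s
        = ((if sep = true then pvPieces rest else []).take n.toNat).map
            (fun q => pvProcessA (String.ofList q)) := by
      simp only [pangram_detector, hlines, hget, hof]
      have hn1 : (1 : Int) = ((1 : Nat) : Int) := by norm_num
      have hn2 : n + 1 = ((n.toNat + 1 : Nat) : Int) := by push_cast; omega
      rw [hps, hn2, hn1, PySem.List.slice_natCast, PySem.List.foldl_append_singleton_eq_map]
      simp only [List.nil_append, Nat.add_sub_cancel]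
      rw [← htail]
      simp only [List.map_cons, List.drop_succ_cons, List.drop_zero, List.map_map,
        List.map_take]
      rfl
    -- B's side
    have hB : pangram_detector_alt s
        = (if sep = false ∨ n ≤ 0 then [] else pvStream rest n [] PySem.Set.empty) := by
      simp only [pangram_detector_alt, hcs, hheadp, hof]
    rw [hA, hB]
    cases hsep : sep with
    | false => simp
    | true =>
      rw [if_pos rfl]
      by_cases hz : n ≤ 0
      · rw [if_pos (Or.inr hz)]
        have h0 : n.toNat = 0 := by omega
        simp [h0]
      · rw [if_neg (by simp [hz])]
        have hm : 1 ≤ n.toNat := by omega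
        have hz' : ((([] : List String).length : Int)) + (n.toNat : Int) = n := by
          simp
          omega
        have hsn : pvStream rest n [] PySem.Set.empty
            = pvEmit (pvAddAll PySem.Set.empty (pvPieces rest).headI)
              :: ((pvPieces rest).tail.take (n.toNat - 1)).map
                  (fun p => pvEmit (pvAddAll PySem.Set.empty p)) := by
          have := pvStreamEq rest n.toNat [] PySem.Set.empty hm
          rw [hz'] at this
          simpa using this
        rw [hsn]
        obtain ⟨q, qs, hqs⟩ : ∃ q qs, pvPieces rest = q :: qs := by
          cases hx : pvPieces rest with
          | nil => exact absurd hx (pvPieces_ne_nil rest)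
          | cons q qs => exact ⟨q, qs, rfl⟩
        obtain ⟨k, hk⟩ : ∃ k, n.toNat = k + 1 := ⟨n.toNat - 1, by omega⟩
        rw [hqs, hk]
        simp only [List.take_succ_cons, List.map_cons, List.headI_cons, List.tail_cons,
          Nat.add_sub_cancel]
        exact congrArg₂ List.cons (pvPiece q)
          (List.map_congr_left (fun x _ => pvPiece x))
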